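-- pv_equiv track=rewrite | github.com/bradhave94/nms-data-extractor | utils/generate_controller_lookup.py | _build_lookup_payload
-- ===== SOURCE A (Python) =====
-- CURATED_TOKEN_ICONS: dict[str, dict[str, str]] = {
--     "Win": {
--         "FE_ALT1": "KEYBOARD/INTERACT.E.png",
--         "FE_SELECT": "MOUSE/KEY.MOUSELEFT.png",
--     },
--     "Psn": {
--         "FE_ALT1": "DS4/PS.WHITE.SQUARE.png",
--         "FE_SELECT": "DS4/PS.WHITE.CROSS.png",
--     },
--     "Xbx": {
--         "FE_ALT1": "XBOX/XBOX.WHITE.X.png",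
--         "FE_SELECT": "XBOX/XBOX.WHITE.A.png",
--     },
--     "Nsw": {
--         "FE_ALT1": "SWITCH/SWITCH.WHITE.X.png",
--         "FE_SELECT": "SWITCH/SWITCH.WHITE.A.png",
--     },
-- }
--
-- ACTION_PATH_TO_FE_TOKEN = {
--     "/actions/FRONTEND/in/menu_transfer": "FE_ALT1",
--     "/actions/FRONTEND/in/select": "FE_SELECT",
--     "/actions/FRONTEND/in/back": "FE_BACK",
-- }
--
-- def _build_lookup_payload(action_labels: dict[str, str]) -> dict[str, list[dict[str, str]]]:
--     """
--     Build output with FE token aliases and icons by platform.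
--     Includes Label for debug/traceability.
--     """
--     payload: dict[str, list[dict[str, str]]] = {}
--     for platform, curated_icons in CURATED_TOKEN_ICONS.items():
--         rows: list[dict[str, str]] = []
--         seen: set[str] = set()
--         for action_path, fe_token in ACTION_PATH_TO_FE_TOKEN.items():
--             if fe_token in seen:
--                 continue
--             seen.add(fe_token)
--             rows.append(
--                 {
--                     "Key": fe_token,
--                     "Icon": curated_icons.get(fe_token, ""),
--                     "ActionPath": action_path,
--                     "Label": action_labels.get(action_path, ""),
--                 }
--             )
--         payload[platform] = sorted(rows, key=lambda r: r["Key"])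
--     return payload
-- ===== SOURCE B (Python) =====
-- CURATED_TOKEN_ICONS: dict[str, dict[str, str]] = {
--     "Win": {
--         "FE_ALT1": "KEYBOARD/INTERACT.E.png",
--         "FE_SELECT": "MOUSE/KEY.MOUSELEFT.png",
--     },
--     "Psn": {
--         "FE_ALT1": "DS4/PS.WHITE.SQUARE.png",
--         "FE_SELECT": "DS4/PS.WHITE.CROSS.png",
--     },
--     "Xbx": {
--         "FE_ALT1": "XBOX/XBOX.WHITE.X.png",
--         "FE_SELECT": "XBOX/XBOX.WHITE.A.png",
--     },
--     "Nsw": {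
--         "FE_ALT1": "SWITCH/SWITCH.WHITE.X.png",
--         "FE_SELECT": "SWITCH/SWITCH.WHITE.A.png",
--     },
-- }
--
-- ACTION_PATH_TO_FE_TOKEN = {
--     "/actions/FRONTEND/in/menu_transfer": "FE_ALT1",
--     "/actions/FRONTEND/in/select": "FE_SELECT",
--     "/actions/FRONTEND/in/back": "FE_BACK",
-- }
--
--
-- def _build_lookup_payload(action_labels: dict[str, str]) -> dict[str, list[dict[str, str]]]:
--     """Build the shared, sorted row template once, then stamp per-platform icons."""
--     template: list[tuple[str, str, str]] = []
--     seen: set[str] = set()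
--     for action_path, fe_token in ACTION_PATH_TO_FE_TOKEN.items():
--         if fe_token not in seen:
--             seen.add(fe_token)
--             template.append((fe_token, action_path, action_labels.get(action_path, "")))
--     template.sort(key=lambda t: t[0])
--     return {
--         platform: [
--             {"Key": key, "Icon": icons.get(key, ""), "ActionPath": path, "Label": label}
--             for key, path, label in template
--         ]
--         for platform, icons in CURATED_TOKEN_ICONS.items()
--     }
-- ===== Notes on version B (the rewrite author's own statement) =====
-- stated objective: alternative
-- what changed: B dedups the action map and sorts the shared row template once, then maps over platforms stamping only the per-platform icon (dict comprehension over a precomputed template), instead of A's per-platform dedup-and-sort loop; same cost since the constant maps are tiny.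
import Mathlib
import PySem

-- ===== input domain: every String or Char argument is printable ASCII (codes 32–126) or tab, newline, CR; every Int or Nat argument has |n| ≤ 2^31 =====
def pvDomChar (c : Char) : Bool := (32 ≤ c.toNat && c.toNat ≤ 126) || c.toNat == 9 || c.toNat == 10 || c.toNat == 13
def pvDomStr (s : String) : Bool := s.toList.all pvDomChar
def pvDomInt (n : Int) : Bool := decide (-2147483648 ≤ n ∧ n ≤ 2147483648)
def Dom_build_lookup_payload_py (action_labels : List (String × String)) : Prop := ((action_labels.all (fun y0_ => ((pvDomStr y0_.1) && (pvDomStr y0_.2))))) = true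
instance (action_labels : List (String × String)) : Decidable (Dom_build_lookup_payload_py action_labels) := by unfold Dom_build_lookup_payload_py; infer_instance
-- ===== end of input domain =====

-- B builds the deduplicated, sorted row template once and stamps per-platform icons by a map,
-- instead of A's per-platform dedup + sort (a different decomposition of the same work).

-- module constants (shared by both ports)
def pvCuratedTokenIcons : List (String × List (String × String)) :=
  [("Win", [("FE_ALT1", "KEYBOARD/INTERACT.E.png"), ("FE_SELECT", "MOUSE/KEY.MOUSELEFT.png")]),
   ("Psn", [("FE_ALT1", "DS4/PS.WHITE.SQUARE.png"), ("FE_SELECT", "DS4/PS.WHITE.CROSS.png")]),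
   ("Xbx", [("FE_ALT1", "XBOX/XBOX.WHITE.X.png"), ("FE_SELECT", "XBOX/XBOX.WHITE.A.png")]),
   ("Nsw", [("FE_ALT1", "SWITCH/SWITCH.WHITE.X.png"), ("FE_SELECT", "SWITCH/SWITCH.WHITE.A.png")])]

def pvActionPathToFeToken : List (String × String) :=
  [("/actions/FRONTEND/in/menu_transfer", "FE_ALT1"),
   ("/actions/FRONTEND/in/select", "FE_SELECT"),
   ("/actions/FRONTEND/in/back", "FE_BACK")]

-- ===== PORT A =====
-- r["Key"] in the sort key is ported as getD: every row literally carries "Key" first, so it is exact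
def build_lookup_payload_py (action_labels : List (String × String)) : List (String × List (List (String × String))) :=
  (pvCuratedTokenIcons.foldl (fun (payload : PySem.Dict String (List (List (String × String)))) pc =>
    let st := pvActionPathToFeToken.foldl
      (fun (st : List (List (String × String)) × PySem.Set String) ap =>
        if ap.2 ∈ st.2 then st
        else (st.1 ++ [[("Key", ap.2),
                        ("Icon", PySem.Dict.getD (PySem.Dict.mk pc.2) ap.2 ""),
                        ("ActionPath", ap.1),
                        ("Label", PySem.Dict.getD (PySem.Dict.mk action_labels) ap.1 "")]],
              PySem.Set.add st.2 ap.2))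
      ([], PySem.Set.empty)
    PySem.Dict.insert payload pc.1
      (PySem.List.sorted st.1 (fun r => PySem.Dict.getD (PySem.Dict.mk r) "Key" "")))
    PySem.Dict.empty).items

-- ===== PORT B =====
def build_lookup_payload_py_alt (action_labels : List (String × String)) : List (String × List (List (String × String))) :=
  let st := pvActionPathToFeToken.foldl
    (fun (st : List (String × String × String) × PySem.Set String) ap =>
      if ap.2 ∈ st.2 then st
      else (st.1 ++ [(ap.2, ap.1, PySem.Dict.getD (PySem.Dict.mk action_labels) ap.1 "")],
            PySem.Set.add st.2 ap.2))
    ([], PySem.Set.empty)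
  let template := PySem.List.sorted st.1 (fun t => t.1)
  pvCuratedTokenIcons.map (fun pc =>
    (pc.1, template.map (fun t =>
      [("Key", t.1),
       ("Icon", PySem.Dict.getD (PySem.Dict.mk pc.2) t.1 ""),
       ("ActionPath", t.2.1),
       ("Label", t.2.2)])))

-- ===== PRECONDITION & SPEC =====
def Spec_build_lookup_payload_py (action_labels : List (String × String)) (out : List (String × List (List (String × String)))) : Prop := out = build_lookup_payload_py_alt action_labels
instance (action_labels : List (String × String)) (out : List (String × List (List (String × String)))) : Decidable (Spec_build_lookup_payload_py action_labels out) := by unfold Spec_build_lookup_payload_py; infer_instance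

-- ===== CLAIM (what is proved, stated in full; the proofs are below) =====
def Claim_equal_build_lookup_payload_py : Prop := ∀ (action_labels : List (String × String)), Dom_build_lookup_payload_py action_labels → Spec_build_lookup_payload_py action_labels (build_lookup_payload_py action_labels)

-- ===== LEMMAS AND PROOFS =====

-- ===== VERDICT (by name: the statement is the Claim_ definition above) =====
theorem build_lookup_payload_py_spec : Claim_equal_build_lookup_payload_py := by
  intro action_labels _
  unfold Spec_build_lookup_payload_py build_lookup_payload_py build_lookup_payload_py_alt
  generalize (PySem.Dict.getD (PySem.Dict.mk action_labels) "/actions/FRONTEND/in/menu_transfer" "") = l1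
  generalize (PySem.Dict.getD (PySem.Dict.mk action_labels) "/actions/FRONTEND/in/select" "") = l2
  generalize (PySem.Dict.getD (PySem.Dict.mk action_labels) "/actions/FRONTEND/in/back" "") = l3
  have h1 : ¬ (['S', 'E', 'L', 'E', 'C', 'T'] < ['A', 'L', 'T', '1']) := by decide
  have h2 : ¬ (['B', 'A', 'C', 'K'] < ['A', 'L', 'T', '1']) := by decide
  have h3 : (['B', 'A', 'C', 'K'] < ['S', 'E', 'L', 'E', 'C', 'T']) := by decide
  simp [pvCuratedTokenIcons, pvActionPathToFeToken, PySem.List.sorted_eq_foldl_insertBy,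
        PySem.List.insertBy, PySem.Dict.getD, PySem.Dict.get?, PySem.Dict.insert,
        PySem.Dict.empty, PySem.Set.add, PySem.Set.empty, List.foldl, h1, h2, h3]
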